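-- pv_equiv track=rewrite | github.com/KCW9294/Algorithm | 프로그래머스/1/133502. 햄버거 만들기/햄버거 만들기.py | solution
-- ===== SOURCE A (Python) =====
-- def solution(ingredient):
--     answer = 0
--     temp = []
--     for i in range(len(ingredient)):
--         temp.append(ingredient[i])
--         if temp[-1]==1 and len(temp)>=4:
--             if temp[-4]==1 and temp[-3]==2 and temp[-2]==3:
--                 temp.pop()
--                 temp.pop()
--                 temp.pop()
--                 temp.pop()
--                 answer += 1
--
--     return answer
-- ===== SOURCE B (Python) =====
-- def solution(ingredient):
--     lst = list(ingredient)
--     answer = 0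
--     while True:
--         for i in range(len(lst) - 3):
--             if lst[i:i+4] == [1, 2, 3, 1]:
--                 del lst[i:i+4]
--                 answer += 1
--                 break
--         else:
--             return answer
-- ===== Notes on version B (the rewrite author's own statement) =====
-- stated objective: alternative
-- what changed: Replaces A's single left-to-right stack pass (push each element, pop four when the stack's last four are 1,2,3,1) with repeated global scanning: find the leftmost window equal to [1,2,3,1], delete it, increment the counter, and rescan from the start until no window remains.
import Mathlib
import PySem

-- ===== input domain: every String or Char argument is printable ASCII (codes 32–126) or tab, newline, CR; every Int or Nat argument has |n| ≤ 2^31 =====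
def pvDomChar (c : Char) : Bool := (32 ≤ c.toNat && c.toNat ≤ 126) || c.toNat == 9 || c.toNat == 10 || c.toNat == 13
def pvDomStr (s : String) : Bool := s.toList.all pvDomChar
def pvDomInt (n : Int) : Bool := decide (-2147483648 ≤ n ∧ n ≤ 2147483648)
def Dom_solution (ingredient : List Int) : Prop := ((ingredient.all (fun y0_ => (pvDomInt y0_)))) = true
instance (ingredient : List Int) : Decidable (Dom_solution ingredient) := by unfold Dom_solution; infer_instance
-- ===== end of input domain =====

-- B replaces A's single-pass stack with repeated leftmost-window search-and-delete (alternative decomposition, not faster).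

-- ===== PORT A =====
-- one iteration of A's for-loop body: append, then check/pop the stack suffix
def stepA (acc : List Int × Int) (x : Int) : List Int × Int :=
  let t := acc.1 ++ [x]
  if PySem.List.pyGet? t (-1) = some 1 ∧ t.length ≥ 4 then
    if PySem.List.pyGet? t (-4) = some 1 ∧ PySem.List.pyGet? t (-3) = some 2 ∧ PySem.List.pyGet? t (-2) = some 3 then
      (t.dropLast.dropLast.dropLast.dropLast, acc.2 + 1)
    else (t, acc.2)
  else (t, acc.2)

def solution (ingredient : List Int) : Int :=
  (ingredient.foldl stepA ([], 0)).2

-- ===== PORT B =====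
-- B's inner for-loop: scan for the first window equal to [1,2,3,1]; some = list with it deleted
def removeFirst? : List Int → Option (List Int)
  | a :: b :: c :: d :: rest =>
      if a = 1 ∧ b = 2 ∧ c = 3 ∧ d = 1 then some rest
      else (removeFirst? (b :: c :: d :: rest)).map (a :: ·)
  | _ => none

theorem removeFirst?_length : ∀ {l l' : List Int}, removeFirst? l = some l' → l'.length + 4 = l.length := by
  intro l
  induction l with
  | nil => intro l' h; simp [removeFirst?] at h
  | cons a tl ih =>
    intro l' h
    match tl, h with
    | b :: c :: d :: rest, h =>
      rw [removeFirst?] at h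
      split at h
      · simp_all
      · simp only [Option.map_eq_some_iff] at h
        obtain ⟨m, hm, rfl⟩ := h
        have := ih hm
        simp at this ⊢
        omega
    | [], h => simp [removeFirst?] at h
    | [b], h => simp [removeFirst?] at h
    | [b, c], h => simp [removeFirst?] at h

-- B's outer while-loop: delete leftmost [1,2,3,1] windows until none remains, counting them
def solution_alt (ingredient : List Int) : Int :=
  match h : removeFirst? ingredient with
  | none => 0
  | some l' => 1 + solution_alt l'
termination_by ingredient.length
decreasing_by have := removeFirst?_length h; omega

-- ===== PRECONDITION & SPEC =====
def Spec_solution (ingredient : List Int) (out : Int) : Prop := out = solution_alt ingredient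
instance (ingredient : List Int) (out : Int) : Decidable (Spec_solution ingredient out) := by unfold Spec_solution; infer_instance

-- ===== CLAIM (what is proved, stated in full; the proofs are below) =====
def Claim_equal_solution : Prop := ∀ (ingredient : List Int), Dom_solution ingredient → Spec_solution ingredient (solution ingredient)

-- ===== LEMMAS AND PROOFS =====

-- the pattern
def patt : List Int := [1, 2, 3, 1]

-- counter additivity of A's step
theorem stepA_count (s : List Int) (c x : Int) :
    stepA (s, c) x = ((stepA (s, 0) x).1, c + (stepA (s, 0) x).2) := by
  simp only [stepA]
  split_ifs <;> simp

theorem foldl_stepA_count (v : List Int) : ∀ (s : List Int) (c : Int),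
    List.foldl stepA (s, c) v = ((List.foldl stepA (s, 0) v).1, c + (List.foldl stepA (s, 0) v).2) := by
  induction v with
  | nil => simp
  | cons x v ih =>
    intro s c
    simp only [List.foldl_cons]
    rw [stepA_count s c x, ih, ih (stepA (s,0) x).1 (stepA (s,0) x).2]
    simp [add_assoc]

-- any list of length ≥ 4 splits off its last four elements
theorem exists_last4 (t : List Int) (h : 4 ≤ t.length) :
    ∃ u a b c d, t = u ++ [a, b, c, d] := by
  have h1 : (t.drop (t.length - 4)).length = 4 := by simp; omega
  rcases e : t.drop (t.length - 4) with _ | ⟨a, _ | ⟨b, _ | ⟨c, _ | ⟨d, _ | ⟨x, r⟩⟩⟩⟩⟩ <;>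
    rw [e] at h1 <;> simp at h1
  exact ⟨t.take (t.length - 4), a, b, c, d, by rw [← e, List.take_append_drop]⟩

-- the four negative indices of a list ending in [a,b,c,d]
theorem pyGetLast4 (u : List Int) (a b c d : Int) :
    PySem.List.pyGet? (u ++ [a, b, c, d]) (-4) = some a ∧
    PySem.List.pyGet? (u ++ [a, b, c, d]) (-3) = some b ∧
    PySem.List.pyGet? (u ++ [a, b, c, d]) (-2) = some c ∧
    PySem.List.pyGet? (u ++ [a, b, c, d]) (-1) = some d := by
  have len : (u ++ [a, b, c, d]).length = u.length + 4 := by simp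
  refine ⟨?_, ?_, ?_, ?_⟩
  · rw [show (-4 : Int) = -((4 : Nat) : Int) by norm_num,
      PySem.List.pyGet?_neg_natCast _ _ (by norm_num) (by simp),
      show (u ++ [a, b, c, d]).length - 4 = u.length + 0 by omega]
    simp
  · rw [show (-3 : Int) = -((3 : Nat) : Int) by norm_num,
      PySem.List.pyGet?_neg_natCast _ _ (by norm_num) (by simp),
      show (u ++ [a, b, c, d]).length - 3 = u.length + 1 by omega]
    simp
  · rw [show (-2 : Int) = -((2 : Nat) : Int) by norm_num,
      PySem.List.pyGet?_neg_natCast _ _ (by norm_num) (by simp),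
      show (u ++ [a, b, c, d]).length - 2 = u.length + 2 by omega]
    simp
  · rw [show (-1 : Int) = -((1 : Nat) : Int) by norm_num,
      PySem.List.pyGet?_neg_natCast _ _ (by norm_num) (by simp),
      show (u ++ [a, b, c, d]).length - 1 = u.length + 3 by omega]
    simp

-- if the four checked negative indices read 1,2,3,1 then the pattern is a suffix
theorem suffix_of_gets (t : List Int) (hlen : 4 ≤ t.length)
    (g4 : PySem.List.pyGet? t (-4) = some 1) (g3 : PySem.List.pyGet? t (-3) = some 2)
    (g2 : PySem.List.pyGet? t (-2) = some 3) (g1 : PySem.List.pyGet? t (-1) = some 1) :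
    patt <:+ t := by
  obtain ⟨u, a, b, c, d, rfl⟩ := exists_last4 t hlen
  obtain ⟨e4, e3, e2, e1⟩ := pyGetLast4 u a b c d
  rw [e4] at g4; rw [e3] at g3; rw [e2] at g2; rw [e1] at g1
  obtain rfl := Option.some.inj g4
  obtain rfl := Option.some.inj g3
  obtain rfl := Option.some.inj g2
  obtain rfl := Option.some.inj g1
  exact ⟨u, rfl⟩

-- if the new suffix is not the pattern, A's step just pushes
theorem stepA_push (s : List Int) (c x : Int) (h : ¬ patt <:+ (s ++ [x])) :
    stepA (s, c) x = (s ++ [x], c) := by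
  simp only [stepA]
  split_ifs with h1 h2
  · exact absurd (suffix_of_gets (s ++ [x]) h1.2 h2.1 h2.2.1 h2.2.2 h1.1) h
  · rfl
  · rfl

-- if the stack ends in 1,2,3 and a 1 arrives, A's step pops four and counts one
theorem stepA_pop (u : List Int) (c : Int) :
    stepA (u ++ [1, 2, 3], c) 1 = (u, c + 1) := by
  have ht : (u ++ [1, 2, 3]) ++ [(1 : Int)] = u ++ [1, 2, 3, 1] := by simp
  simp only [stepA, ht]
  obtain ⟨g4, g3, g2, g1⟩ := pyGetLast4 u (1 : Int) 2 3 1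
  have hlen : (u ++ [(1 : Int), 2, 3, 1]).length ≥ 4 := by simp
  rw [if_pos ⟨g1, hlen⟩, if_pos ⟨g4, g3, g2⟩]
  have d1 : (u ++ [(1 : Int), 2, 3, 1]).dropLast = u ++ [1, 2, 3] := by
    rw [show u ++ [(1 : Int), 2, 3, 1] = (u ++ [1, 2, 3]) ++ [1] by simp, List.dropLast_concat]
  have d2 : (u ++ [(1 : Int), 2, 3]).dropLast = u ++ [1, 2] := by
    rw [show u ++ [(1 : Int), 2, 3] = (u ++ [1, 2]) ++ [3] by simp, List.dropLast_concat]
  have d3 : (u ++ [(1 : Int), 2]).dropLast = u ++ [1] := by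
    rw [show u ++ [(1 : Int), 2] = (u ++ [1]) ++ [2] by simp, List.dropLast_concat]
  rw [d1, d2, d3, List.dropLast_concat]

-- scanning a pattern-free list just rebuilds it on the stack
theorem foldl_stepA_free (u : List Int) (h : ¬ patt <:+: u) :
    List.foldl stepA ([], 0) u = (u, 0) := by
  induction u using List.reverseRecOn with
  | nil => rfl
  | append_singleton w a ih =>
    rw [List.foldl_append, ih (fun hi => h (hi.trans (List.prefix_append w [a]).isInfix)), List.foldl_cons,
      List.foldl_nil, stepA_push w 0 a (fun hs => h hs.isInfix)]

-- removeFirst? finds the leftmost occurrence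
theorem removeFirst?_spec : ∀ {l l' : List Int}, removeFirst? l = some l' →
    ∃ u v, l = u ++ patt ++ v ∧ l' = u ++ v ∧ ¬ patt <:+: (u ++ [1, 2, 3]) := by
  intro l
  induction l with
  | nil => intro l' h; simp [removeFirst?] at h
  | cons a tl ih =>
    intro l' h
    match tl, h with
    | [], h => simp [removeFirst?] at h
    | [b], h => simp [removeFirst?] at h
    | [b, c], h => simp [removeFirst?] at h
    | b :: c :: d :: rest, h =>
      rw [removeFirst?] at h
      split at h
      next hg =>
        obtain ⟨rfl, rfl, rfl, rfl⟩ := hg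
        refine ⟨[], rest, by simp [patt], by simp_all, ?_⟩
        intro hi
        have := hi.length_le
        simp [patt] at this
      next hg =>
        simp only [Option.map_eq_some_iff] at h
        obtain ⟨m, hm, rfl⟩ := h
        obtain ⟨u, v, he, rfl, hno⟩ := ih hm
        refine ⟨a :: u, v, by simp [he], rfl, ?_⟩
        intro hi
        rw [show a :: u ++ [(1:Int),2,3] = a :: (u ++ [1,2,3]) by simp] at hi
        rcases List.infix_cons_iff.mp hi with hp | hi'
        · -- patt is a prefix of a :: u ++ [1,2,3]; then it is a prefix of l, contradicting the guard
          have hp2 : patt <+: (a :: u) ++ patt ++ v :=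
            hp.trans ⟨[1] ++ v, by simp [patt]⟩
          obtain ⟨w, hw⟩ := hp2
          have hl : (a :: u) ++ patt ++ v = a :: b :: c :: d :: rest := by simp [he]
          rw [hl] at hw
          -- patt ++ w = a :: b :: c :: d :: rest forces a=1,b=2,c=3,d=1
          simp [patt] at hw
          exact hg ⟨hw.1.symm, hw.2.1.symm, hw.2.2.1.symm, hw.2.2.2.1.symm⟩
        · exact hno hi'

-- A's count removes the leftmost occurrence and counts one
theorem solution_remove (u v : List Int) (h : ¬ patt <:+: (u ++ [1, 2, 3])) :
    solution (u ++ patt ++ v) = 1 + solution (u ++ v) := by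
  have hu : ¬ patt <:+: u := fun hi => h (hi.trans (List.prefix_append u [1,2,3]).isInfix)
  have h1 : List.foldl stepA ([], 0) (u ++ patt ++ v) = List.foldl stepA (u, 1) v := by
    rw [show u ++ patt ++ v = (u ++ [1,2,3]) ++ ([1] ++ v) by simp [patt], List.foldl_append,
      foldl_stepA_free _ h, List.foldl_append, List.foldl_cons, List.foldl_nil, stepA_pop u 0]
    norm_num
  have h2 : List.foldl stepA ([], 0) (u ++ v) = List.foldl stepA (u, 0) v := by
    rw [List.foldl_append, foldl_stepA_free _ hu]
  simp only [solution]
  rw [h1, h2, foldl_stepA_count v u 1]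

-- no occurrence anywhere ⇒ removeFirst? finds nothing, and A counts zero
theorem removeFirst?_none_no_infix : ∀ {l : List Int}, removeFirst? l = none → ¬ patt <:+: l := by
  intro l
  induction l with
  | nil => intro _ hi; have := hi.length_le; simp [patt] at this
  | cons a tl ih =>
    intro h hi
    match tl, h with
    | [], h => have := hi.length_le; simp [patt] at this
    | [b], h => have := hi.length_le; simp [patt] at this
    | [b, c], h => have := hi.length_le; simp [patt] at this
    | b :: c :: d :: rest, h =>
      rw [removeFirst?] at h
      split at h
      · simp at h
      next hg =>
        simp only [Option.map_eq_none_iff] at h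
        rcases List.infix_cons_iff.mp hi with hp | hi'
        · obtain ⟨w, hw⟩ := hp
          simp [patt] at hw
          exact hg ⟨hw.1.symm, hw.2.1.symm, hw.2.2.1.symm, hw.2.2.2.1.symm⟩
        · exact ih h hi'

-- main equivalence, by strong induction on length
theorem solution_eq_alt (ingredient : List Int) : solution ingredient = solution_alt ingredient := by
  rw [solution_alt]
  split
  next hnone =>
    have := removeFirst?_none_no_infix hnone
    simp [solution, foldl_stepA_free _ this]
  next l' hsome =>
    obtain ⟨u, v, he, hl', hno⟩ := removeFirst?_spec hsome
    rw [he, solution_remove u v hno, ← hl', solution_eq_alt l']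
termination_by ingredient.length
decreasing_by simp [he, hl', patt]; omega

-- ===== VERDICT (by name: the statement is the Claim_ definition above) =====
theorem solution_spec : Claim_equal_solution := by
  intro ingredient _
  exact solution_eq_alt ingredient
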